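-- pv_equiv track=rewrite | github.com/ChaoticGooose/VCE-Algorithmics-HESS | cells/cells.py | cells
-- ===== SOURCE A (Python) =====
-- def cells(passes, n):
--     cells = [{i: False for i in range(1,n+1)}] # Set every cell to unlocked initally
--     for i in range(0, passes-1):
--         cells.append(dict())
--         for cell in cells[i]:
--             if cell % (i+2) == 0:
--                 if cells[i][cell] == False:
--                     cells[i+1][cell] = True
--                 else:
--                     cells[i+1][cell] = False
--             else:
--                 cells[i+1][cell] = cells[i][cell]
--     return cells
-- ===== SOURCE B (Python) =====
-- def cells(passes, n):
--     # Column-by-column: compute each cell's trajectory once, then transpose.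
--     L = passes if passes > 1 else 1
--     def column(c):
--         s = False
--         out = [s]
--         for m in range(1, L):
--             if c % (m + 1) == 0:
--                 s = not s
--             out.append(s)
--         return out
--     cols = [column(c) for c in range(1, n + 1)]
--     return [{c: col[m] for c, col in zip(range(1, n + 1), cols)} for m in range(L)]
-- ===== Notes on version B (the rewrite author's own statement) =====
-- stated objective: alternative
-- what changed: B builds the table column-by-column (one running state per cell, then transposes) instead of A's row-by-row derivation of each layer from the previous dict.
import Mathlib
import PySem

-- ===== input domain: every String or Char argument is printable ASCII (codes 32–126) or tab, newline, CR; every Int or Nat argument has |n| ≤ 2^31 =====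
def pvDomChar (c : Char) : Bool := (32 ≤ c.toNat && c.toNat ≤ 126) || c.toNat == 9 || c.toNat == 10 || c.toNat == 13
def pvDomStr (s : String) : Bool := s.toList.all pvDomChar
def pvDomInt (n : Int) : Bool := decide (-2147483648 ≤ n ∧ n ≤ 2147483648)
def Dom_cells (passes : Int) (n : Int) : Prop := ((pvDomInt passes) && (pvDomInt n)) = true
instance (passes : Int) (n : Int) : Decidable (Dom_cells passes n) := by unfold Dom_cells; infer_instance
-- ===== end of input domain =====

-- B builds the per-pass table column-by-column (one running toggle state per cell) instead of
-- A's row-by-row derivation of each layer dict from the previous one; same cost, different decomposition.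

-- ===== PORT A =====
-- A: layers list seeded with {1..n: False}; each iteration appends a fresh dict built by
-- toggling the cells of layer i divisible by i+2 (dict assignment of fresh keys = Dict.insert into empty).
def cells (passes : Int) (n : Int) : List (List (Int × Bool)) :=
  let layer0 : List (Int × Bool) := (PySem.List.pyRange 1 (n + 1) 1).map (fun i => (i, false))
  (PySem.List.pyRange 0 (passes - 1) 1).foldl
    (fun acc i =>
      let prev := PySem.List.pyGetD acc i []
      acc ++ [(prev.foldl
        (fun (d : PySem.Dict Int Bool) p =>
          d.insert p.1
            (if PySem.Int.mod p.1 (i + 2) = 0 then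
              (if p.2 = false then true else false)
            else p.2))
        PySem.Dict.empty).items])
    [layer0]

-- ===== PORT B =====
-- B helper: the trajectory of one cell c through L passes (running state, appended per pass).
def pvColumn (c : Int) (L : Int) : Bool × List Bool :=
  (PySem.List.pyRange 1 L 1).foldl
    (fun (acc : Bool × List Bool) m =>
      let s := if PySem.Int.mod c (m + 1) = 0 then !acc.1 else acc.1
      (s, acc.2 ++ [s]))
    (false, [false])

def cells_alt (passes : Int) (n : Int) : List (List (Int × Bool)) :=
  let L : Int := if passes > 1 then passes else 1
  let cols := (PySem.List.pyRange 1 (n + 1) 1).map (fun c => (pvColumn c L).2)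
  (PySem.List.pyRange 0 L 1).map (fun m =>
    ((PySem.List.pyRange 1 (n + 1) 1).zip cols).map
      (fun p => (p.1, PySem.List.pyGetD p.2 m false)))

-- ===== PRECONDITION & SPEC =====
def Spec_cells (passes : Int) (n : Int) (out : List (List (Int × Bool))) : Prop := out = cells_alt passes n
instance (passes : Int) (n : Int) (out : List (List (Int × Bool))) : Decidable (Spec_cells passes n out) := by unfold Spec_cells; infer_instance

-- ===== CLAIM (what is proved, stated in full; the proofs are below) =====
def Claim_equal_cells : Prop := ∀ (passes : Int) (n : Int), Dom_cells passes n → Spec_cells passes n (cells passes n)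

-- ===== LEMMAS AND PROOFS =====

-- the state of cell c after pass index m (layer m)
def pvF : Nat → Int → Bool
  | 0, _ => false
  | m + 1, c => if PySem.Int.mod c ((m : Int) + 2) = 0 then !(pvF m c) else pvF m c

def pvLayer (m : Nat) (n : Int) : List (Int × Bool) :=
  (PySem.List.pyRange 1 (n + 1) 1).map (fun c => (c, pvF m c))

theorem pv_zip_self_map {α β : Type} (l : List α) (g : α → β) :
    l.zip (l.map g) = l.map (fun x => (x, g x)) := by
  induction l with
  | nil => rfl
  | cons x xs ih => simp [ih]

theorem pv_layer_nodup_keys (m : Nat) (n : Int) :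
    ((pvLayer m n).map Prod.fst).Nodup := by
  simp only [pvLayer, List.map_map]
  have : (Prod.fst ∘ fun c => (c, pvF m c)) = (id : Int → Int) := rfl
  rw [this, List.map_id]
  exact PySem.List.nodup_pyRange_one 1 (n + 1)

theorem pvA_loop (n : Int) (K : Nat) :
    (PySem.List.pyRange 0 (K : Int) 1).foldl
      (fun acc i =>
        acc ++ [((PySem.List.pyGetD acc i []).foldl
          (fun (d : PySem.Dict Int Bool) p =>
            d.insert p.1
              (if PySem.Int.mod p.1 (i + 2) = 0 then
                (if p.2 = false then true else false)
              else p.2))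
          PySem.Dict.empty).items])
      [pvLayer 0 n]
    = (List.range (K + 1)).map (fun m => pvLayer m n) := by
  induction K with
  | zero =>
    have hr : PySem.List.pyRange 0 ((0 : Nat) : Int) 1 = [] := by
      rw [PySem.List.pyRange_one]; rfl
    rw [hr]; simp
  | succ K ih =>
    have hr : PySem.List.pyRange 0 ((K + 1 : Nat) : Int) 1
        = PySem.List.pyRange 0 (K : Int) 1 ++ [(K : Int)] := by
      have := PySem.List.pyRange_one_succ_right (a := 0) (b := (K : Int)) (by omega)
      push_cast
      exact this
    rw [hr, List.foldl_append, ih]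
    simp only [List.foldl_cons, List.foldl_nil]
    have hget : PySem.List.pyGetD ((List.range (K + 1)).map (fun m => pvLayer m n)) (K : Int) []
        = pvLayer K n := by
      rw [PySem.List.pyGetD_natCast]
      simp [List.getD]
    rw [hget]
    have hfold := PySem.Dict.items_foldl_insert_fresh
      (l := pvLayer K n) (k := Prod.fst)
      (v := fun p => (if PySem.Int.mod p.1 ((K : Int) + 2) = 0 then
                (if p.2 = false then true else false) else p.2))
      (d := PySem.Dict.empty)
      (by intro a _; simp)
      (pv_layer_nodup_keys K n)
    rw [hfold]
    have hempty : (PySem.Dict.empty : PySem.Dict Int Bool).items = [] := rfl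
    rw [hempty, List.nil_append]
    rw [List.range_succ (n := K + 1), List.map_append]
    congr 1
    simp only [List.map_cons, List.map_nil]
    congr 1
    unfold pvLayer
    rw [List.map_map]
    apply List.map_congr_left
    intro c _
    simp only [Function.comp]
    have hpv : pvF (K + 1) c = if PySem.Int.mod c ((K : Int) + 2) = 0 then !(pvF K c) else pvF K c := rfl
    rw [hpv]
    rcases Bool.eq_false_or_eq_true (pvF K c) with h | h <;> simp [h]

theorem pv_cells_eq_table (passes n : Int) :
    cells passes n = (List.range (max passes 1).toNat).map (fun m => pvLayer m n) := by
  unfold cells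
  have hlayer0 : (PySem.List.pyRange 1 (n + 1) 1).map (fun i => (i, false)) = pvLayer 0 n := by
    simp [pvLayer, pvF]
  by_cases h : passes <= 1
  · have hr : PySem.List.pyRange 0 (passes - 1) 1 = [] := by
      rw [PySem.List.pyRange_one]
      have : (passes - 1 - 0).toNat = 0 := by omega
      rw [this]; rfl
    rw [hr, hlayer0]
    have : (max passes 1).toNat = 1 := by omega
    rw [this]
    simp
  · set K : Nat := (passes - 1).toNat with hK
    have hr : PySem.List.pyRange 0 (passes - 1) 1 = PySem.List.pyRange 0 (K : Int) 1 := by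
      congr 1; omega
    rw [hr, hlayer0, pvA_loop]
    have : (max passes 1).toNat = K + 1 := by omega
    rw [this]

theorem pvColumn_snd (c : Int) (K : Nat) :
    pvColumn c ((K : Int) + 1) = (pvF K c, (List.range (K + 1)).map (fun m => pvF m c)) := by
  induction K with
  | zero =>
    have hr : PySem.List.pyRange 1 ((0 : Int) + 1) 1 = [] := by
      rw [PySem.List.pyRange_one]; rfl
    simp [pvColumn, pvF]
  | succ K ih =>
    unfold pvColumn at ih ⊢
    have hr : PySem.List.pyRange 1 (((K : Nat) + 1 : Nat) + 1 : Int) 1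
        = PySem.List.pyRange 1 ((K : Int) + 1) 1 ++ [(K : Int) + 1] := by
      have := PySem.List.pyRange_one_succ_right (a := 1) (b := (K : Int) + 1) (by omega)
      push_cast
      exact this
    rw [hr, List.foldl_append, ih]
    simp only [List.foldl_cons, List.foldl_nil]
    have hstep : (if PySem.Int.mod c ((K : Int) + 1 + 1) = 0 then !(pvF K c) else pvF K c)
        = pvF (K + 1) c := by
      have : ((K : Int) + 1 + 1) = ((K : Int) + 2) := by ring
      rw [this]; rfl
    rw [hstep]
    rw [List.range_succ (n := K + 1), List.map_append]
    simp

theorem pv_cells_alt_eq_table (passes n : Int) :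
    cells_alt passes n = (List.range (max passes 1).toNat).map (fun m => pvLayer m n) := by
  set L : Int := if passes > 1 then passes else 1 with hLdef
  have hdef : cells_alt passes n
      = (PySem.List.pyRange 0 L 1).map (fun m =>
          ((PySem.List.pyRange 1 (n + 1) 1).zip
            ((PySem.List.pyRange 1 (n + 1) 1).map (fun c => (pvColumn c L).2))).map
            (fun p => (p.1, PySem.List.pyGetD p.2 m false))) := rfl
  rw [hdef]
  have hL1 : 1 ≤ L := by rw [hLdef]; split <;> omega
  have hLmax : L = max passes 1 := by rw [hLdef]; split <;> omega
  obtain ⟨K, hK⟩ : ∃ K : Nat, L = (K : Int) + 1 := ⟨L.toNat - 1, by omega⟩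
  have hcols : (PySem.List.pyRange 1 (n + 1) 1).map (fun c => (pvColumn c L).2)
      = (PySem.List.pyRange 1 (n + 1) 1).map
          (fun c => (List.range (K + 1)).map (fun m => pvF m c)) := by
    apply List.map_congr_left
    intro c _
    rw [hK, pvColumn_snd]
  rw [hcols]
  have hrange : PySem.List.pyRange 0 L 1 = (List.range (K + 1)).map (fun k : Nat => (k : Int)) := by
    rw [PySem.List.pyRange_one]
    have : (L - 0).toNat = K + 1 := by omega
    rw [this]
    simp
  rw [hrange, List.map_map]
  have hLK : (max passes 1).toNat = K + 1 := by omega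
  rw [hLK]
  apply List.map_congr_left
  intro k hk
  have hklt : k < K + 1 := List.mem_range.mp hk
  simp only [Function.comp]
  rw [pv_zip_self_map, List.map_map]
  unfold pvLayer
  apply List.map_congr_left
  intro c _
  simp only [Function.comp]
  rw [PySem.List.pyGetD_natCast]
  simp [List.getD, hklt]

-- ===== VERDICT (by name: the statement is the Claim_ definition above) =====
theorem cells_spec : Claim_equal_cells := by
  intro passes n _
  unfold Spec_cells
  rw [pv_cells_eq_table, pv_cells_alt_eq_table]
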